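-- pv_equiv track=rewrite | github.com/jazzy712/TIL-2 | pythonProject1/1225_pw_creator.py | pw_creator
-- ===== SOURCE A (Python) =====
-- def pw_creator(arr):
--     #  초기값 1부터
--     i = 1
--     # 계속 반복
--     while True:
--         # 맨 앞 숫자 i씩 감소
--         front = arr[0] - i
--         # 첫 번째 숫자 제거하고
--         arr.pop(0)
--         # 숫자가 0보다 클 때
--         if front > 0:
--             # 맨 뒤에 숫자 추가
--             arr.append(front)
--         # 0보다 작다면
--         else:
--             # 맨 뒤에 0 추가
--             arr.append(0)
--             # 0 추가 됐으므로 중단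
--             break
--         # i가 1부터 5까지 순환해야함
--         i = (i % 5) + 1
--     # 이 때, 8자리의 숫자 값이 결과
--     # arr 은 정수 형태이므로 문자열로 변환
--     # 하나의 문자열로 결합해서 반환
--     return ' '.join(map(str, arr))
-- ===== SOURCE B (Python) =====
-- # Circular-index simulation: no O(n) pop(0)/append reshaping; values updated in
-- # place in a fixed array, result read out as a rotation.  (Unlike A, B does not
-- # mutate the caller's list; the return value is identical.)
-- def pw_creator(arr):
--     vals = list(arr)
--     n = len(vals)
--     t = 0
--     while True:
--         j = t % n
--         front = vals[j] - (t % 5 + 1)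
--         if front > 0:
--             vals[j] = front
--             t += 1
--         else:
--             vals[j] = 0
--             break
--     return ' '.join(str(vals[(t + 1 + k) % n]) for k in range(n))
-- ===== Notes on version B (the rewrite author's own statement) =====
-- stated objective: faster
-- what changed: Replaces A's per-step pop(0)/append queue reshaping by an in-place update at a circular index into a fixed array, reading the result off as a rotation.
import Mathlib
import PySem

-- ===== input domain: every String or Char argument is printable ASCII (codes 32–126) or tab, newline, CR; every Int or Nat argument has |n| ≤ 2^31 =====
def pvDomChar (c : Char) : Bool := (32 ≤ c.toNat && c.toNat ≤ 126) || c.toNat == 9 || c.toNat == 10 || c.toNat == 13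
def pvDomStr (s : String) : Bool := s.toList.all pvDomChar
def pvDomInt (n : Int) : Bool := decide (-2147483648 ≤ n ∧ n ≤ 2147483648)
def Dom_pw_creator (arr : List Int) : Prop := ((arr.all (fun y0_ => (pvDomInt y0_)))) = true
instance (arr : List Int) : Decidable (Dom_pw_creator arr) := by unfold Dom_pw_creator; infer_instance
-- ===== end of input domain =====

-- B replaces A's pop(0)/append queue reshaping by in-place updates at a circular index
-- into a fixed array, reading the answer off as a rotation.  (A mutates its argument
-- list in place; B does not — the equivalence proved is about the return value.)

-- ===== PORT A =====
-- termination helper for both loops (cited by their decreasing_by)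
theorem pv_sum_toNat_set (l : List Int) (j : Nat) (a : Int) (h : j < l.length) :
    ((l.set j a).map Int.toNat).sum + (l.getD j 0).toNat
      = (l.map Int.toNat).sum + a.toNat := by
  induction l generalizing j with
  | nil => simp at h
  | cons hd tl ih =>
    cases j with
    | zero => simp [List.getD]; omega
    | succ j =>
      have hj : j < tl.length := by simpa using h
      have := ih j hj
      simp only [List.set_cons_succ, List.map_cons, List.sum_cons, List.getD_cons_succ] at this ⊢
      omega

-- the 'while True' loop of A: state (arr, i); arr.pop(0)/arr.append become head / ++[·]
def loopA (arr : List Int) (i : Int) : List Int :=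
  match arr with
  | [] => []   -- unreachable from pw_creator's call on a nonempty list
  | v :: rest =>
    if h : v - i > 0 then
      loopA (rest ++ [v - i]) (PySem.Int.mod i 5 + 1)
    else rest ++ [0]
termination_by ((if 1 ≤ i then 0 else 1 : Nat), (arr.map Int.toNat).sum)
decreasing_by
  have hm : 0 ≤ PySem.Int.mod i 5 := PySem.Int.mod_nonneg i (by norm_num)
  by_cases hi : 1 ≤ i
  · simp only [if_pos hi, if_pos (by omega : 1 ≤ PySem.Int.mod i 5 + 1)]
    apply Prod.Lex.right
    simp only [List.map_append, List.sum_append, List.map, List.sum_cons, List.sum_nil]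
    omega
  · simp only [if_neg hi, if_pos (by omega : 1 ≤ PySem.Int.mod i 5 + 1)]
    exact Prod.Lex.left _ _ (by omega)

def pw_creator (arr : List Int) : String :=
  -- ' '.join(map(str, arr)) after the loop; Python raises IndexError on [] (excluded by Pre_)
  PySem.Str.join " " ((loopA arr 1).map PySem.Int.toStr)

-- ===== PORT B =====
-- the while loop of B: state (vals, t); j = t % len, front = vals[j] - (t % 5 + 1)
def loopB (vals : List Int) (t : Nat) : List Int × Nat :=
  if hf : vals.getD (t % vals.length) 0 - (((t % 5 : Nat) : Int) + 1) > 0 then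
    loopB (vals.set (t % vals.length)
      (vals.getD (t % vals.length) 0 - (((t % 5 : Nat) : Int) + 1))) (t + 1)
  else (vals.set (t % vals.length) 0, t)
termination_by (vals.map Int.toNat).sum
decreasing_by
  have hnn : vals ≠ [] := by
    intro he; subst he; simp [List.getD] at hf; omega
  have hj : t % vals.length < vals.length := Nat.mod_lt t (List.length_pos_iff.mpr hnn)
  have := pv_sum_toNat_set vals (t % vals.length)
    (vals.getD (t % vals.length) 0 - (((t % 5 : Nat) : Int) + 1)) hj
  omega

def pw_creator_alt (arr : List Int) : String :=
  -- Python raises ZeroDivisionError on [] (t % 0); excluded by Pre_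
  PySem.Str.join " "
    ((List.range arr.length).map
      (fun k => PySem.Int.toStr ((loopB arr 0).1.getD (((loopB arr 0).2 + 1 + k) % (loopB arr 0).1.length) 0)))

-- ===== PRECONDITION & SPEC =====
-- Pre_ excludes only the empty list, on which A raises IndexError (and B ZeroDivisionError).
def Pre_pw_creator (arr : List Int) : Prop := arr ≠ []
instance (arr : List Int) : Decidable (Pre_pw_creator arr) := by unfold Pre_pw_creator; infer_instance
def pvWitness_pw_creator : List Int := ([3, 1, 2] : List Int)

def Spec_pw_creator (arr : List Int) (out : String) : Prop := out = pw_creator_alt arr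
instance (arr : List Int) (out : String) : Decidable (Spec_pw_creator arr out) := by unfold Spec_pw_creator; infer_instance

-- ===== CLAIM (what is proved, stated in full; the proofs are below) =====
def Claim_equal_pw_creator : Prop := ∀ (arr : List Int), Dom_pw_creator arr → Pre_pw_creator arr → Spec_pw_creator arr (pw_creator arr)

-- ===== LEMMAS AND PROOFS =====

-- the contents of A's queue after t steps, as a rotation of B's array
def rot (l : List Int) (t : Nat) : List Int :=
  (List.range l.length).map (fun k => l.getD ((t + k) % l.length) 0)

theorem loopA_cons (v : Int) (rest : List Int) (i : Int) :
    loopA (v :: rest) i =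
      if v - i > 0 then loopA (rest ++ [v - i]) (PySem.Int.mod i 5 + 1)
      else rest ++ [0] := by
  rw [loopA]; simp only [dite_eq_ite]

theorem loopB_eq (vals : List Int) (t : Nat) :
    loopB vals t =
      if vals.getD (t % vals.length) 0 - (((t % 5 : Nat) : Int) + 1) > 0 then
        loopB (vals.set (t % vals.length)
          (vals.getD (t % vals.length) 0 - (((t % 5 : Nat) : Int) + 1))) (t + 1)
      else (vals.set (t % vals.length) 0, t) := by
  rw [loopB]; simp only [dite_eq_ite]

theorem rot_zero (l : List Int) : rot l 0 = l := by
  apply List.ext_getElem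
  · simp [rot]
  · intro k hk hk'
    simp [rot, List.getD_eq_getElem?_getD, Nat.mod_eq_of_lt, hk']

theorem rot_cons (l : List Int) (t : Nat) (h : l ≠ []) :
    rot l t = l.getD (t % l.length) 0 ::
      (List.range (l.length - 1)).map (fun k => l.getD ((t + 1 + k) % l.length) 0) := by
  have hn : 0 < l.length := List.length_pos_iff.mpr h
  unfold rot
  obtain ⟨m, hm⟩ : ∃ m, l.length = m + 1 := ⟨l.length - 1, by omega⟩
  rw [hm, List.range_succ_eq_map]
  simp only [List.map_cons, List.map_map, Nat.add_zero, Nat.add_succ_sub_one]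
  congr 1
  apply List.map_congr_left
  intro k _
  simp only [Function.comp_apply]
  congr 2
  omega

theorem rot_set (l : List Int) (t : Nat) (f : Int) (h : l ≠ []) :
    (List.range (l.length - 1)).map (fun k => l.getD ((t + 1 + k) % l.length) 0) ++ [f]
      = rot (l.set (t % l.length) f) (t + 1) := by
  have hn : 0 < l.length := List.length_pos_iff.mpr h
  obtain ⟨m, hm⟩ : ∃ m, l.length = m + 1 := ⟨l.length - 1, by omega⟩
  unfold rot
  rw [List.length_set, hm, Nat.add_sub_cancel, List.range_succ, List.map_append,
    List.map_cons, List.map_nil]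
  congr 1
  · apply List.map_congr_left
    intro k hk
    have hk' : k < m := List.mem_range.mp hk
    have hne : (t + 1 + k) % (m + 1) ≠ t % (m + 1) := by
      have h1 : (t + 1 + k) % (m + 1) = (t % (m + 1) + (1 + k)) % (m + 1) := by
        conv_lhs => rw [show t + 1 + k = t + (1 + k) by omega]
        rw [Nat.add_mod, Nat.mod_eq_of_lt (by omega : 1 + k < m + 1)]
      have hjm : t % (m + 1) < m + 1 := Nat.mod_lt _ (by omega)
      rw [h1]
      by_cases hc : t % (m + 1) + (1 + k) < m + 1
      · rw [Nat.mod_eq_of_lt hc]; omega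
      · rw [Nat.mod_eq_sub_mod (by omega), Nat.mod_eq_of_lt (by omega)]; omega
    have hlt : (t + 1 + k) % (m + 1) < m + 1 := Nat.mod_lt _ (by omega)
    rw [List.getD_eq_getElem _ _ (by omega : (t + 1 + k) % (m + 1) < l.length),
      List.getD_eq_getElem _ _ (by rw [List.length_set, hm]; omega : (t + 1 + k) % (m + 1) < (l.set (t % (m + 1)) f).length),
      List.getElem_set_ne (by omega)]
  · have he : (t + 1 + m) % (m + 1) = t % (m + 1) := by
      rw [show t + 1 + m = t + (m + 1) by omega, Nat.add_mod_right]
    have hjm : t % (m + 1) < m + 1 := Nat.mod_lt _ (by omega)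
    rw [he, List.getD_eq_getElem _ _ (by rw [List.length_set, hm]; omega : t % (m + 1) < (l.set (t % (m + 1)) f).length),
      List.getElem_set_self (by simp only [List.length_set]; omega)]

theorem pv_i_step (t : Nat) :
    PySem.Int.mod (((t % 5 : Nat) : Int) + 1) 5 + 1 = ((((t + 1) % 5 : Nat) : Int) + 1) := by
  rw [PySem.Int.mod_eq_emod_of_pos (by norm_num)]
  omega

-- the main invariant: A's queue after t steps is the rotation of B's array by t,
-- with A's counter i = t % 5 + 1; the final queues coincide as well
theorem loopB_main (n : Nat) : ∀ (vals : List Int) (t : Nat), vals ≠ [] →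
    (vals.map Int.toNat).sum = n →
    (loopB vals t).1.length = vals.length ∧
    loopA (rot vals t) (((t % 5 : Nat) : Int) + 1)
      = rot (loopB vals t).1 ((loopB vals t).2 + 1) := by
  induction n using Nat.strong_induction_on with
  | _ n ih =>
  intro vals t h hsum
  have hn : 0 < vals.length := List.length_pos_iff.mpr h
  have hj : t % vals.length < vals.length := Nat.mod_lt t hn
  rw [loopB_eq]
  by_cases hf : vals.getD (t % vals.length) 0 - (((t % 5 : Nat) : Int) + 1) > 0
  · rw [if_pos hf]
    have hdec := pv_sum_toNat_set vals (t % vals.length)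
      (vals.getD (t % vals.length) 0 - (((t % 5 : Nat) : Int) + 1)) hj
    have hne : vals.set (t % vals.length)
        (vals.getD (t % vals.length) 0 - (((t % 5 : Nat) : Int) + 1)) ≠ [] := by
      simpa using h
    obtain ⟨ihlen, ihrot⟩ := ih _ (by omega) _ (t + 1) hne rfl
    refine ⟨by rw [ihlen]; simp, ?_⟩
    rw [rot_cons vals t h, loopA_cons, if_pos hf, rot_set vals t _ h, pv_i_step]
    exact ihrot
  · rw [if_neg hf]
    refine ⟨by simp, ?_⟩
    rw [rot_cons vals t h, loopA_cons, if_neg hf]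
    exact rot_set vals t 0 h

-- ===== VERDICT (by name: the statement is the Claim_ definition above) =====
theorem pw_creator_spec : Claim_equal_pw_creator := by
  intro arr _ hpre
  unfold Spec_pw_creator pw_creator pw_creator_alt
  obtain ⟨hlen, hrot⟩ := loopB_main ((arr.map Int.toNat).sum) arr 0 hpre rfl
  have h1 : (1 : Int) = (((0 % 5 : Nat) : Int) + 1) := by norm_num
  rw [rot_zero] at hrot
  rw [h1, hrot, ← hlen]
  unfold rot
  rw [List.map_map]
  rfl
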